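-- pv_equiv track=rewrite | github.com/jurajHasik/peps-torch | ctm/pess_kagome_abelian/rdm_kagome.py | _expand_perm
-- ===== SOURCE A (Python) =====
-- def _expand_perm(n_inds):
--     c_sum=0
--     group1, group2= [], []
--     for n in n_inds:
--         if n==0: continue
--         group1.extend( list(range(2*c_sum,2*c_sum+n)) )
--         group2.extend( list(range(2*c_sum+n,2*c_sum+2*n)) )
--         c_sum+= n
--     return group1, group2
-- ===== SOURCE B (Python) =====
-- def _expand_perm(n_inds):
--     # Divide and conquer: recursively split the list in halves; each half expands
--     # itself into the shared output lists, the right half at base offset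
--     # off + (left half's total); returns the subtree's total size.
--     g1, g2 = [], []
--     def go(lst, off):
--         if not lst:
--             return 0
--         if len(lst) == 1:
--             n = lst[0]
--             g1.extend(range(2 * off, 2 * off + n))
--             g2.extend(range(2 * off + n, 2 * off + 2 * n))
--             return n
--         mid = len(lst) // 2
--         sl = go(lst[:mid], off)
--         sr = go(lst[mid:], off + sl)
--         return sl + sr
--     go(n_inds, 0)
--     return g1, g2
-- ===== Notes on version B (the rewrite author's own statement) =====
-- stated objective: alternative
-- what changed: B is a divide-and-conquer recursion: it splits the list in halves, each half expanding itself into shared output lists (the right half at offset shifted by the left half's returned total), instead of A's single left-to-right loop carrying a running offset accumulator.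
import Mathlib
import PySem

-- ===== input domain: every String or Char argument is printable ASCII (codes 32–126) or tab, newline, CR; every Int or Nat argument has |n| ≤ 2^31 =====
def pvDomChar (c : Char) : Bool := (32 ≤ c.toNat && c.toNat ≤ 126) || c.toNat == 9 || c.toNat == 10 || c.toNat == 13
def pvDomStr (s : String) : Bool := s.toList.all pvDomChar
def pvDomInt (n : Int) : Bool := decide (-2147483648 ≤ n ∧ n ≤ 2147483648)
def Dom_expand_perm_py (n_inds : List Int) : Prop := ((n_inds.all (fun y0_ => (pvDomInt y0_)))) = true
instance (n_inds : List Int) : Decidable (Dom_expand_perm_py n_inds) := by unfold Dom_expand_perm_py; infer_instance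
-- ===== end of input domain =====

-- B replaces A's single offset-accumulator loop by a divide-and-conquer recursion over halves of the list; alternative decomposition, same result.


-- ===== PORT A =====
-- state = (c_sum, group1, group2); 'continue' on n == 0
def expand_perm_py (n_inds : List Int) : List Int × List Int :=
  let st := n_inds.foldl (fun (st : Int × List Int × List Int) n =>
    if n == 0 then st
    else (st.1 + n,
          st.2.1 ++ PySem.List.pyRange (2 * st.1) (2 * st.1 + n) 1,
          st.2.2 ++ PySem.List.pyRange (2 * st.1 + n) (2 * st.1 + 2 * n) 1))
    (0, [], [])
  (st.2.1, st.2.2)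

-- ===== PORT B =====
-- divide and conquer with shared accumulators: go(lst, off) extends g1/g2 with
-- lst's expansion at base offset off and returns lst's total; the right half
-- runs at offset off + (left total); mid = len // 2
def pvGo : List Int → Int → List Int → List Int → Int × List Int × List Int
  | [], _, g1, g2 => (0, g1, g2)
  | [n], off, g1, g2 =>
      (n, g1 ++ PySem.List.pyRange (2 * off) (2 * off + n) 1,
          g2 ++ PySem.List.pyRange (2 * off + n) (2 * off + 2 * n) 1)
  | n1 :: n2 :: t, off, g1, g2 =>
      let l := n1 :: n2 :: t
      let mid := l.length / 2
      let L := pvGo (l.take mid) off g1 g2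
      let R := pvGo (l.drop mid) (off + L.1) L.2.1 L.2.2
      (L.1 + R.1, R.2.1, R.2.2)
termination_by l _ _ _ => l.length
decreasing_by
  · simpa [List.length_take] using by omega
  · simpa [List.length_drop] using by omega

def expand_perm_py_alt (n_inds : List Int) : List Int × List Int :=
  let r := pvGo n_inds 0 [] []
  (r.2.1, r.2.2)

-- ===== PRECONDITION & SPEC =====
def Spec_expand_perm_py (n_inds : List Int) (out : List Int × List Int) : Prop := out = expand_perm_py_alt n_inds
instance (n_inds : List Int) (out : List Int × List Int) : Decidable (Spec_expand_perm_py n_inds out) := by unfold Spec_expand_perm_py; infer_instance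

-- ===== CLAIM (what is proved, stated in full; the proofs are below) =====
def Claim_equal_expand_perm_py : Prop := ∀ (n_inds : List Int), Dom_expand_perm_py n_inds → Spec_expand_perm_py n_inds (expand_perm_py n_inds)

-- ===== LEMMAS AND PROOFS =====

-- the intended flattened expansions with running offset c; both ports are proved equal to (pvF1 0, pvF2 0)
def pvF1 (c : Int) : List Int → List Int
  | [] => []
  | n :: t => PySem.List.pyRange (2 * c) (2 * c + n) 1 ++ pvF1 (c + n) t

def pvF2 (c : Int) : List Int → List Int
  | [] => []
  | n :: t => PySem.List.pyRange (2 * c + n) (2 * c + 2 * n) 1 ++ pvF2 (c + n) t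

lemma pvRange_nil (a b : Int) (h : b ≤ a) : PySem.List.pyRange a b 1 = [] := by
  rw [PySem.List.pyRange_one]
  simp [Int.toNat_of_nonpos (by omega : b - a ≤ 0)]

lemma pvF1_append (c : Int) (l1 l2 : List Int) :
    pvF1 c (l1 ++ l2) = pvF1 c l1 ++ pvF1 (c + l1.sum) l2 := by
  induction l1 generalizing c with
  | nil => simp [pvF1]
  | cons n t ih => simp [pvF1, ih, List.append_assoc, add_assoc]

lemma pvF2_append (c : Int) (l1 l2 : List Int) :
    pvF2 c (l1 ++ l2) = pvF2 c l1 ++ pvF2 (c + l1.sum) l2 := by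
  induction l1 generalizing c with
  | nil => simp [pvF2]
  | cons n t ih => simp [pvF2, ih, List.append_assoc, add_assoc]

-- B's recursion appends pvF1 c / pvF2 c and returns the sum
lemma pvGo_eq : ∀ (l : List Int) (c : Int) (g1 g2 : List Int),
    pvGo l c g1 g2 = (l.sum, g1 ++ pvF1 c l, g2 ++ pvF2 c l) := by
  intro l c g1 g2
  induction l, c, g1, g2 using pvGo.induct with
  | case1 g1 g2 => simp [pvGo, pvF1, pvF2]
  | case2 n off g1 g2 => simp [pvGo, pvF1, pvF2]
  | case3 n1 n2 t off g1 g2 l' mid' L' ih1 ih1b ih2 =>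
    simp only [l', mid', L'] at ih1 ih2
    simp only [pvGo]
    rw [ih2, ih1]
    have htd : List.take ((t.length + 1 + 1) / 2) (n1 :: n2 :: t) ++
               List.drop ((t.length + 1 + 1) / 2) (n1 :: n2 :: t) = n1 :: n2 :: t :=
      List.take_append_drop _ _
    conv_rhs => rw [← htd, List.sum_append, pvF1_append, pvF2_append]
    simp [List.append_assoc]

-- A's foldl started at (c, g1, g2) appends pvF1 c / pvF2 c
lemma pvA_fold (l : List Int) : ∀ (c : Int) (g1 g2 : List Int),
    (l.foldl (fun (st : Int × List Int × List Int) n =>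
      if n == 0 then st
      else (st.1 + n,
            st.2.1 ++ PySem.List.pyRange (2 * st.1) (2 * st.1 + n) 1,
            st.2.2 ++ PySem.List.pyRange (2 * st.1 + n) (2 * st.1 + 2 * n) 1)) (c, g1, g2)).2
    = (g1 ++ pvF1 c l, g2 ++ pvF2 c l) := by
  induction l with
  | nil => intro c g1 g2; simp [pvF1, pvF2]
  | cons n t ih =>
    intro c g1 g2
    by_cases hn : n = 0
    · subst hn
      simp only [List.foldl_cons, pvF1, pvF2]
      rw [if_pos (by simp)]
      rw [pvRange_nil _ _ (by omega), pvRange_nil _ _ (by omega)]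
      simpa using ih c g1 g2
    · simp only [List.foldl_cons, pvF1, pvF2]
      rw [if_neg (by simpa using hn), ih]
      simp [List.append_assoc]

-- ===== VERDICT (by name: the statement is the Claim_ definition above) =====
theorem expand_perm_py_spec : Claim_equal_expand_perm_py := by
  intro n_inds _
  unfold Spec_expand_perm_py expand_perm_py expand_perm_py_alt
  rw [pvGo_eq]
  exact pvA_fold n_inds 0 [] []
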